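-- pv_equiv track=rewrite | github.com/seungkeolkim/data-model-management-platform | backend/lib/manipulators/cls_merge_classes.py | _merge_multi_label
-- ===== SOURCE A (Python) =====
-- def _merge_multi_label(
--     label_value: list[str],
--     source_class_set: set[str],
--     target_class: str,
-- ) -> tuple[list[str], bool]:
--     """multi-label head: source_classes 중 하나라도 있으면 OR 병합.
--
--     source_classes 에 해당하는 항목을 모두 제거하고 target_class 를 추가한다.
--     이미 target_class 가 있으면 중복 추가하지 않는다.
--
--     Returns:
--         (new_label_value, did_merge)
--     """
--     has_source = any(cls_name in source_class_set for cls_name in label_value)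
--     if not has_source:
--         return list(label_value), False
--
--     # source 제거 후 target 추가.
--     new_value = [cls_name for cls_name in label_value if cls_name not in source_class_set]
--     if target_class not in new_value:
--         new_value.append(target_class)
--     return new_value, True
-- ===== SOURCE B (Python) =====
-- def _merge_multi_label(
--     label_value: list[str],
--     source_class_set: set[str],
--     target_class: str,
-- ) -> tuple[list[str], bool]:
--     kept = []
--     has_source = False
--     target_seen = False
--     for cls_name in label_value:
--         if cls_name in source_class_set:
--             has_source = True
--         else:
--             kept.append(cls_name)
--             if cls_name == target_class:
--                 target_seen = True
--     if not has_source: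
--         return list(label_value), False
--     if not target_seen:
--         kept.append(target_class)
--     return kept, True
-- ===== Notes on version B (the rewrite author's own statement) =====
-- stated objective: alternative
-- what changed: Replaces A's three separate scans (any, filter comprehension, membership test on the filtered list) by one loop over label_value that builds the kept list while tracking has_source and target_seen booleans.
import Mathlib
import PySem

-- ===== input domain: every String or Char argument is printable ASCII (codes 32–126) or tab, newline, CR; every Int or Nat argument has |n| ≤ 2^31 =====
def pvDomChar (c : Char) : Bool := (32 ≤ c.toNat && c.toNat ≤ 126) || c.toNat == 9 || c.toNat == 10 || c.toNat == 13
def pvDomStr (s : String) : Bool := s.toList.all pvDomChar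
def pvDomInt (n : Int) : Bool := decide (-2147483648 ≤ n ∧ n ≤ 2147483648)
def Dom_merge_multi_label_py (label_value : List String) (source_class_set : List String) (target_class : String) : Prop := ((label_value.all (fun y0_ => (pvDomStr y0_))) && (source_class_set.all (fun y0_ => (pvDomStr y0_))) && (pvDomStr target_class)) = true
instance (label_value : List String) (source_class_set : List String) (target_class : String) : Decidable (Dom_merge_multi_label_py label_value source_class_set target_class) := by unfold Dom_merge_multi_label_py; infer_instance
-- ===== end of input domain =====

-- B replaces A's three scans over label_value (any / filter comprehension / membership test) by a single loop tracking has_source and target_seen; same cost, different decomposition.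


-- ===== PORT A =====
-- Port of A: three scans — any-membership, filter comprehension, membership test before append.
def merge_multi_label_py (label_value : List String) (source_class_set : List String) (target_class : String) : List String × Bool :=
  let has_source := label_value.any (fun cls_name => source_class_set.contains cls_name)
  if !has_source then (label_value, false)
  else
    let new_value := label_value.filter (fun cls_name => !source_class_set.contains cls_name)
    let new_value := if !new_value.contains target_class then new_value ++ [target_class] else new_value
    (new_value, true)

-- ===== PORT B =====
-- Port of B: one fold over label_value carrying (kept, has_source, target_seen).
def merge_multi_label_py_alt (label_value : List String) (source_class_set : List String) (target_class : String) : List String × Bool :=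
  let st := label_value.foldl
    (fun (s : List String × Bool × Bool) cls_name =>
      if source_class_set.contains cls_name then (s.1, true, s.2.2)
      else (s.1 ++ [cls_name], s.2.1, s.2.2 || (cls_name == target_class)))
    ([], false, false)
  if !st.2.1 then (label_value, false)
  else if !st.2.2 then (st.1 ++ [target_class], true)
  else (st.1, true)

-- ===== PRECONDITION & SPEC =====
def Spec_merge_multi_label_py (label_value : List String) (source_class_set : List String) (target_class : String) (out : List String × Bool) : Prop := out = merge_multi_label_py_alt label_value source_class_set target_class
instance (label_value : List String) (source_class_set : List String) (target_class : String) (out : List String × Bool) : Decidable (Spec_merge_multi_label_py label_value source_class_set target_class out) := by unfold Spec_merge_multi_label_py; infer_instance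

-- ===== CLAIM (what is proved, stated in full; the proofs are below) =====
def Claim_equal_merge_multi_label_py : Prop := ∀ (label_value : List String) (source_class_set : List String) (target_class : String), Dom_merge_multi_label_py label_value source_class_set target_class → Spec_merge_multi_label_py label_value source_class_set target_class (merge_multi_label_py label_value source_class_set target_class)

-- ===== LEMMAS AND PROOFS =====

-- The fold in B computes the filtered list, the any-membership flag, and whether the
-- target occurs among the kept elements.
theorem alt_fold_spec (src : List String) (tgt : String) (l acc : List String) (hs ts : Bool) :
    l.foldl
      (fun (s : List String × Bool × Bool) cls_name =>
        if src.contains cls_name then (s.1, true, s.2.2)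
        else (s.1 ++ [cls_name], s.2.1, s.2.2 || (cls_name == tgt)))
      (acc, hs, ts)
    = (acc ++ l.filter (fun c => !src.contains c),
       hs || l.any (fun c => src.contains c),
       ts || (l.filter (fun c => !src.contains c)).contains tgt) := by
  induction l generalizing acc hs ts with
  | nil => simp
  | cons x xs ih =>
    rw [List.foldl_cons]
    by_cases hx : src.contains x = true
    · rw [if_pos hx, ih]
      simp only [List.filter_cons, List.any_cons, hx, Bool.not_true, Bool.false_eq_true,
        if_false, Bool.true_or, Bool.or_true]
    · rw [if_neg hx, ih]
      rw [Bool.not_eq_true] at hx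
      simp only [List.filter_cons, List.any_cons, List.contains_cons, hx, Bool.not_false,
        if_true, List.cons_append, List.append_assoc, Bool.false_or,
        Bool.or_assoc]
      rw [List.nil_append, Bool.beq_comm]

-- ===== VERDICT (by name: the statement is the Claim_ definition above) =====
theorem merge_multi_label_py_spec : Claim_equal_merge_multi_label_py := by
  intro lv src tgt _
  unfold Spec_merge_multi_label_py merge_multi_label_py merge_multi_label_py_alt
  rw [alt_fold_spec]
  simp only [Bool.false_or, List.nil_append]
  cases h : lv.any (fun c => src.contains c) with
  | false => rfl
  | true =>
    cases ht : (List.filter (fun c => !src.contains c) lv).contains tgt <;>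
      simp [ht]
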